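-- pv_equiv track=rewrite | github.com/Max-Moro/lg-cli | lg/adapters/optimizations/literals/processing/pipeline.py | _get_base_indent
-- ===== SOURCE A (Python) =====
-- def _get_base_indent(text: str, byte_pos: int) -> str:
--     """Get indentation of line containing byte position."""
--     line_start = text.rfind('\n', 0, byte_pos)
--     if line_start == -1:
--         line_start = 0
--     else:
--         line_start += 1
--
--     indent = ""
--     for i in range(line_start, min(byte_pos, len(text))):
--         if text[i] in ' \t':
--             indent += text[i]
--         else:
--             break
--
--     return indent
-- ===== SOURCE B (Python) =====
-- def _get_base_indent(text: str, byte_pos: int) -> str: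
--     """Get indentation of line containing byte position."""
--     pos = max(0, min(byte_pos, len(text)))
--     line_start = text.rfind('\n', 0, pos) + 1
--     line = text[line_start:pos]
--     return line[:len(line) - len(line.lstrip(' \t'))]
-- ===== Notes on version B (the rewrite author's own statement) =====
-- stated objective: simpler
-- what changed: B clamps the position once, takes the line as a single slice text[line_start:pos] using the rfind+1 idiom, and derives the indentation via lstrip(' \t') instead of A's character-by-character accumulating loop with a break.
import Mathlib
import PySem

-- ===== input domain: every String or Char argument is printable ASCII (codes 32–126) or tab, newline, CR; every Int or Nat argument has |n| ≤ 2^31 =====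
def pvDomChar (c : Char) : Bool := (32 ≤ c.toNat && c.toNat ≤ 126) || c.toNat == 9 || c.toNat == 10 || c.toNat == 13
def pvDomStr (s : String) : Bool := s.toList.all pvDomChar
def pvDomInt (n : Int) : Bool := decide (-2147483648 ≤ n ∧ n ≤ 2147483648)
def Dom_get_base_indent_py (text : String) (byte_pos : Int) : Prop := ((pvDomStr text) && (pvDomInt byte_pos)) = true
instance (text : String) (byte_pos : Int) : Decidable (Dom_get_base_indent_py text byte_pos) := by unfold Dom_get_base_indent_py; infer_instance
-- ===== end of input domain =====

-- B replaces A's character-accumulating loop by one slice of the line and an lstrip-based prefix length (objective: simpler).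

-- ===== PORT A =====
-- A's for-loop over range(line_start, stop) with break, accumulating `indent`
def pvIndentLoop : List Char → List Char → List Char
  | [], indent => indent
  | c :: rest, indent => if c = ' ' || c = '\t' then pvIndentLoop rest (indent ++ [c]) else indent

def get_base_indent_py (text : String) (byte_pos : Int) : String :=
  let cs := text.toList
  let ls0 := PySem.Chars.rfindFrom cs ['\n'] 0 (some byte_pos)       -- text.rfind('\n', 0, byte_pos)
  let line_start : Int := if ls0 = -1 then 0 else ls0 + 1
  let stop : Int := min byte_pos (cs.length : Int)
  -- for i in range(line_start, stop): accesses exactly the segment cs[line_start:stop] in order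
  String.mk (pvIndentLoop ((cs.take stop.toNat).drop line_start.toNat) [])

-- ===== PORT B =====
def get_base_indent_py_alt (text : String) (byte_pos : Int) : String :=
  let cs := text.toList
  let n : Int := cs.length
  let pos : Int := max 0 (min byte_pos n)
  let line_start : Int := PySem.Chars.rfindFrom cs ['\n'] 0 (some pos) + 1
  let line := PySem.List.slice cs (some line_start) (some pos)       -- text[line_start:pos]
  -- line.lstrip(' \t') ported exactly: drop the leading run of ' '/'\t'
  let k : Int := (line.length : Int) - ((line.dropWhile (fun c => c = ' ' || c = '\t')).length : Int)
  String.mk (PySem.List.slice line none (some k))                    -- line[:k]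

-- ===== PRECONDITION & SPEC =====
def Spec_get_base_indent_py (text : String) (byte_pos : Int) (out : String) : Prop := out = get_base_indent_py_alt text byte_pos
instance (text : String) (byte_pos : Int) (out : String) : Decidable (Spec_get_base_indent_py text byte_pos out) := by unfold Spec_get_base_indent_py; infer_instance

-- ===== CLAIM (what is proved, stated in full; the proofs are below) =====
def Claim_equal_get_base_indent_py : Prop := ∀ (text : String) (byte_pos : Int), Dom_get_base_indent_py text byte_pos → Spec_get_base_indent_py text byte_pos (get_base_indent_py text byte_pos)

-- ===== LEMMAS AND PROOFS =====

-- the loop of A computes the leading whitespace prefix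
theorem pvIndentLoop_eq (l acc : List Char) :
    pvIndentLoop l acc = acc ++ l.takeWhile (fun c => c = ' ' || c = '\t') := by
  induction l generalizing acc with
  | nil => simp [pvIndentLoop]
  | cons c rest ih =>
    simp only [pvIndentLoop, List.takeWhile]
    by_cases h : (c = ' ' || c = '\t') = true
    · simp [h, ih]
    · simp [h]

-- B's prefix-length slice is takeWhile
theorem take_sub_dropWhile (p : Char → Bool) (l : List Char) :
    l.take (l.length - (l.dropWhile p).length) = l.takeWhile p := by
  induction l with
  | nil => simp
  | cons c t ih =>
    by_cases h : p c = true
    · have hle := List.length_dropWhile_le (p := p) (l := t)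
      simp only [List.dropWhile_cons, List.takeWhile_cons, h, if_true, List.length_cons]
      have h2 : t.length + 1 - (List.dropWhile p t).length
          = (t.length - (List.dropWhile p t).length) + 1 := by omega
      rw [h2, List.take_succ_cons, ih]
    · simp [List.dropWhile, List.takeWhile, h]

-- a one-char pattern can only be a prefix of a nonempty list
theorem prefix_ne_nil {c : Char} {l : List Char} (h : [c].isPrefixOf l = true) : l ≠ [] := by
  cases l with
  | nil => simp [List.isPrefixOf] at h
  | cons a t => simp

-- rfind of a one-char pattern is -1 or a valid index
theorem rfind_go_bound (s : List Char) (c : Char) (j : Nat) :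
    PySem.Chars.rfind.go s [c] j = -1 ∨
      (0 ≤ PySem.Chars.rfind.go s [c] j ∧ PySem.Chars.rfind.go s [c] j < (s.length : Int)) := by
  induction j with
  | zero =>
    simp only [PySem.Chars.rfind.go]
    by_cases h : [c].isPrefixOf s = true
    · right
      have := prefix_ne_nil h
      have : 0 < s.length := List.length_pos_iff.mpr this
      simp [h]; omega
    · left; simp [h]
  | succ j ih =>
    simp only [PySem.Chars.rfind.go]
    by_cases h : [c].isPrefixOf (s.drop (j + 1)) = true
    · right
      have hne := prefix_ne_nil h
      have : 0 < (s.drop (j + 1)).length := List.length_pos_iff.mpr hne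
      simp only [List.length_drop] at this
      simp [h]
      constructor
      · positivity
      · exact_mod_cast by omega
    · simpa [h] using ih

theorem rfind_bound (s : List Char) (c : Char) :
    PySem.Chars.rfind s [c] = -1 ∨
      (0 ≤ PySem.Chars.rfind s [c] ∧ PySem.Chars.rfind s [c] < (s.length : Int)) := by
  simpa [PySem.Chars.rfind] using rfind_go_bound s c s.length

-- rfindFrom with start 0 and a nonnegative end e ≤ len reduces to rfind on the prefix
theorem rfindFrom_zero_some (s : List Char) (c : Char) (e : Int) (h0 : 0 ≤ e)
    (hle : e ≤ (s.length : Int)) :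
    PySem.Chars.rfindFrom s [c] 0 (some e) =
      (if PySem.Chars.rfind (s.take e.toNat) [c] = -1 then -1
       else PySem.Chars.rfind (s.take e.toNat) [c]) := by
  simp only [PySem.Chars.rfindFrom]
  have h1 : ¬ ((s.length : Int) < e) := by omega
  have h2 : ¬ (e < 0) := by omega
  have h3 : ¬ (e < (0 : Int)) := h2
  simp [h1, h2, List.drop_zero]

-- ===== VERDICT (by name: the statement is the Claim_ definition above) =====
theorem get_base_indent_py_spec : Claim_equal_get_base_indent_py := by
  intro text byte_pos _
  unfold Spec_get_base_indent_py
  simp only [get_base_indent_py, get_base_indent_py_alt]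
  set cs := text.toList with hcs
  by_cases hneg : byte_pos < 0
  · -- both produce ""
    have hstop : (min byte_pos (cs.length : Int)).toNat = 0 := by
      have : min byte_pos (cs.length : Int) ≤ byte_pos := min_le_left _ _
      omega
    have hpos : max 0 (min byte_pos (cs.length : Int)) = 0 := by
      have : min byte_pos (cs.length : Int) ≤ byte_pos := min_le_left _ _
      omega
    simp only [hpos, hstop]
    rw [rfindFrom_zero_some cs '\n' 0 le_rfl (by exact_mod_cast Nat.zero_le cs.length)]
    simp [PySem.Chars.rfind, PySem.Chars.rfind.go, List.isPrefixOf, PySem.List.slice,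
      PySem.List.clampIdx, pvIndentLoop]
  · -- 0 ≤ byte_pos
    rw [not_lt] at hneg
    set p : Int := min byte_pos (cs.length : Int) with hp
    have hp0 : 0 ≤ p := le_min hneg (by exact_mod_cast Nat.zero_le cs.length)
    have hpn : p ≤ (cs.length : Int) := min_le_right _ _
    have hmax : max 0 p = p := max_eq_right hp0
    have hEndA : PySem.Chars.rfindFrom cs ['\n'] 0 (some byte_pos) =
        PySem.Chars.rfindFrom cs ['\n'] 0 (some p) := by
      by_cases hbig : (cs.length : Int) < byte_pos
      · have hpe : p = (cs.length : Int) := by omega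
        rw [rfindFrom_zero_some cs '\n' p hp0 hpn]
        simp only [PySem.Chars.rfindFrom]
        simp [hbig, hpe]
      · have : p = byte_pos := by omega
        rw [this]
    rw [hEndA, hmax]
    rw [rfindFrom_zero_some cs '\n' p hp0 hpn]
    set r : Int := PySem.Chars.rfind (cs.take p.toNat) ['\n'] with hr
    have hrb := rfind_bound (cs.take p.toNat) '\n'
    rw [← hr] at hrb
    have hlen_take : ((cs.take p.toNat).length : Int) = p := by
      simp [List.length_take]
      omega
    -- line_start as a Nat a, with a ≤ p in both cases
    rcases hrb with hm1 | ⟨hr0, hrlt⟩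
    · -- r = -1, line_start = 0
      simp only [hm1, ite_self]
      norm_num
      rw [PySem.List.slice_to cs hp0]
      set line := cs.take p.toNat with hline
      have hk0 : (0 : Int) ≤ (line.length : Int) - ((line.dropWhile (fun c => c = ' ' || c = '\t')).length : Int) := by
        have := List.length_dropWhile_le (p := fun c => c = ' ' || c = '\t') (l := line)
        omega
      rw [PySem.List.slice_to line hk0]
      have hkt : ((line.length : Int) - ((line.dropWhile (fun c => c = ' ' || c = '\t')).length : Int)).toNat
          = line.length - (line.dropWhile (fun c => c = ' ' || c = '\t')).length := by omega
      rw [hkt, take_sub_dropWhile, pvIndentLoop_eq]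
      simp
    · -- 0 ≤ r < p
      have hrne : ¬ (r = -1) := by omega
      rw [hlen_take] at hrlt
      simp only [hrne, if_false]
      have hsegA : (cs.take p.toNat).drop (r + 1).toNat =
          PySem.List.slice cs (some (r + 1)) (some p) := by
        simp only [PySem.List.slice, PySem.List.clampIdx]
        have h1 : ¬ (r + 1 < 0) := by omega
        have h2 : ¬ (p < 0) := by omega
        simp [h1, h2]
        have hmin1 : min (r + 1).toNat cs.length = (r + 1).toNat := by omega
        have hmin2 : min p.toNat cs.length = p.toNat := by omega
        rw [hmin1, hmin2, List.drop_take]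
      rw [hsegA]
      set line := PySem.List.slice cs (some (r + 1)) (some p) with hline
      have hk0 : (0 : Int) ≤ (line.length : Int) - ((line.dropWhile (fun c => c = ' ' || c = '\t')).length : Int) := by
        have := List.length_dropWhile_le (p := fun c => c = ' ' || c = '\t') (l := line)
        omega
      rw [PySem.List.slice_to line hk0]
      have hkt : ((line.length : Int) - ((line.dropWhile (fun c => c = ' ' || c = '\t')).length : Int)).toNat
          = line.length - (line.dropWhile (fun c => c = ' ' || c = '\t')).length := by omega
      rw [hkt, take_sub_dropWhile, pvIndentLoop_eq]
      simp
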